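-- pv_equiv track=rewrite | github.com/harpik-p/academic-paper-recommender | model/citations.py | get_outgoing
-- ===== SOURCE A (Python) =====
-- from collections import Counter
--
-- def get_outgoing(paper_id, citations_out_dict, citations_in_dict, top=50):
--     """ Gets paper-X such that papers cited by given paper are also cited by paper-X
--
--     Args:
--         paper_id (string): pmid number
--         citations_out_dict (dictionary): complete list of papers with from_paper_id for key and
--         to_paper_id as value
--         citations_in_dict (dictionary): complete list of papers with to_paper_id for key and
--         from_paper_id as value
--         top (int): desired number of related numbers. default is 50.
--
--     Return:
--         list: list of top 50 relevant papers for the given paper based on outgoing citations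
--     """
--     cited_papers = citations_out_dict[paper_id]
--     outgoing_papers = []
--     for paper in cited_papers:
--         outgoing_papers.extend(citations_in_dict[paper])
--     # get the top relevant papers based on how much overlap there is
--     dict_outgoing_papers = Counter(outgoing_papers)
--     temp_top50 = [pairs[0] for pairs in dict_outgoing_papers.most_common(top+1)]
--     # we omit the first paper as it is the given paper
--     return temp_top50[1:]
-- ===== SOURCE B (Python) =====
-- def get_outgoing(paper_id, citations_out_dict, citations_in_dict, top=50):
--     counts = {}
--     for cited in citations_out_dict[paper_id]:
--         for other in citations_in_dict[cited]:
--             counts[other] = counts.get(other, 0) + 1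
--     # counting sort: bucket papers by overlap count, emit buckets from the top count down
--     buckets = {}
--     for paper, c in counts.items():
--         buckets.setdefault(c, []).append(paper)
--     maxc = max(counts.values(), default=0)
--     ranked = []
--     for c in range(maxc, 0, -1):
--         ranked.extend(buckets.get(c, []))
--     return ranked[1:max(top + 1, 0)]
-- ===== Notes on version B (the rewrite author's own statement) =====
-- stated objective: alternative
-- what changed: Replaces Counter.most_common's heap-based top-k selection with a counting sort: papers are grouped into buckets keyed by overlap count and the buckets are emitted from the maximum count down, so no comparison sort or heap is used.
import Mathlib
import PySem

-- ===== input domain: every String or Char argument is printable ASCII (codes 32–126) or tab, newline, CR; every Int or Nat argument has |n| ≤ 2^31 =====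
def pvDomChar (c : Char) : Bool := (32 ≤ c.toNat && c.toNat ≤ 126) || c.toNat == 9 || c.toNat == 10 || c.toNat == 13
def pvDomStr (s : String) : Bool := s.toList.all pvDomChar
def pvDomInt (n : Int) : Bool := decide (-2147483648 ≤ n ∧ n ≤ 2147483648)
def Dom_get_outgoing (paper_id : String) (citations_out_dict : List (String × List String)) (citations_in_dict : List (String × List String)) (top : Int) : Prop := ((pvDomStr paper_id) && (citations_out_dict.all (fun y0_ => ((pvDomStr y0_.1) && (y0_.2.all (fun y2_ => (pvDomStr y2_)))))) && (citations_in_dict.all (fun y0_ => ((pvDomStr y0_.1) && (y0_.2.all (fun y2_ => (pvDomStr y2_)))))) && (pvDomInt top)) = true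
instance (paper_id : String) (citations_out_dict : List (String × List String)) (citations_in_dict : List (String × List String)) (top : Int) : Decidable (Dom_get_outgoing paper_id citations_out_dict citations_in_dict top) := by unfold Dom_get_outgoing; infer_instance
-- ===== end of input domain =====

-- B replaces Counter.most_common's heap-based top-k selection with a counting sort: papers are
-- grouped into buckets by overlap count and the buckets are emitted from the top count down
-- (objective: alternative); return values agree wherever A returns.

-- ===== PORT A =====
-- Counter.most_common(n) is ported by its documented contract: the items list sorted by count
-- descending (stable, Python's reverse rule), truncated to n (empty when n < 0).
def get_outgoing (paper_id : String) (citations_out_dict : List (String × List String)) (citations_in_dict : List (String × List String)) (top : Int) : List String :=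
  let cited_papers := (PySem.Dict.ofList citations_out_dict).getD paper_id []
  let outgoing_papers := cited_papers.foldl
      (fun acc paper => acc ++ (PySem.Dict.ofList citations_in_dict).getD paper []) []
  let dict_outgoing_papers := PySem.Dict.counter outgoing_papers
  let temp_top50 :=
    ((PySem.List.sorted dict_outgoing_papers.items (fun pairs => pairs.2) true).map (·.1)).take
      (top + 1).toNat
  temp_top50.drop 1

-- ===== PORT B =====
-- buckets.setdefault(c, []).append(paper) is ported as insert of (getD ++ [paper]): Dict.insert
-- overwrites in place / appends a new key, exactly setdefault followed by in-place append.
def get_outgoing_alt (paper_id : String) (citations_out_dict : List (String × List String)) (citations_in_dict : List (String × List String)) (top : Int) : List String :=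
  let counts := ((PySem.Dict.ofList citations_out_dict).getD paper_id []).foldl
      (fun counts cited =>
        ((PySem.Dict.ofList citations_in_dict).getD cited []).foldl
          (fun counts other => counts.insert other (counts.getD other 0 + 1)) counts)
      PySem.Dict.empty
  let buckets := counts.items.foldl
      (fun (b : PySem.Dict Int (List String)) kv => b.insert kv.2 (b.getD kv.2 [] ++ [kv.1]))
      PySem.Dict.empty
  let maxc := PySem.List.maxD counts.values (fun v => v) 0
  let ranked := (PySem.List.pyRange maxc 0 (-1)).foldl (fun acc c => acc ++ buckets.getD c []) []
  PySem.List.slice ranked (some 1) (some (max (top + 1) 0))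

-- ===== PRECONDITION & SPEC =====
-- A raises KeyError when paper_id is not a key of citations_out_dict or some cited paper is not
-- a key of citations_in_dict; Pre_ excludes exactly those inputs.
def Pre_get_outgoing (paper_id : String) (citations_out_dict : List (String × List String)) (citations_in_dict : List (String × List String)) (top : Int) : Prop :=
  (PySem.Dict.ofList citations_out_dict).contains paper_id = true ∧
  ∀ p ∈ (PySem.Dict.ofList citations_out_dict).getD paper_id [],
    (PySem.Dict.ofList citations_in_dict).contains p = true
instance (paper_id : String) (citations_out_dict : List (String × List String)) (citations_in_dict : List (String × List String)) (top : Int) : Decidable (Pre_get_outgoing paper_id citations_out_dict citations_in_dict top) := by unfold Pre_get_outgoing; infer_instance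

def pvWitness_get_outgoing : String × (List (String × List String)) × (List (String × List String)) × Int :=
  ("a", [("a", ["b"])], [("b", ["a", "c"])], 50)

def Spec_get_outgoing (paper_id : String) (citations_out_dict : List (String × List String)) (citations_in_dict : List (String × List String)) (top : Int) (out : List String) : Prop := out = get_outgoing_alt paper_id citations_out_dict citations_in_dict top
instance (paper_id : String) (citations_out_dict : List (String × List String)) (citations_in_dict : List (String × List String)) (top : Int) (out : List String) : Decidable (Spec_get_outgoing paper_id citations_out_dict citations_in_dict top out) := by unfold Spec_get_outgoing; infer_instance

-- ===== CLAIM (what is proved, stated in full; the proofs are below) =====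
def Claim_equal_get_outgoing : Prop := ∀ (paper_id : String) (citations_out_dict : List (String × List String)) (citations_in_dict : List (String × List String)) (top : Int), Dom_get_outgoing paper_id citations_out_dict citations_in_dict top → Pre_get_outgoing paper_id citations_out_dict citations_in_dict top → Spec_get_outgoing paper_id citations_out_dict citations_in_dict top (get_outgoing paper_id citations_out_dict citations_in_dict top)

-- ===== LEMMAS AND PROOFS =====

-- B's counting dict is the Counter of A's concatenated list.
lemma counts_eq_counter (cited : List String) (g : String → List String) :
    cited.foldl
      (fun counts c => (g c).foldl
        (fun counts other => counts.insert other (counts.getD other 0 + 1)) counts)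
      PySem.Dict.empty
    = PySem.Dict.counter (cited.foldl (fun acc paper => acc ++ g paper) []) := by
  rw [PySem.List.foldl_append_eq_flatMap, List.nil_append,
    ← PySem.Dict.foldl_insert_getD_add_one_eq_counter, List.foldl_flatMap]

-- A's take-then-drop selection equals B's slice [1 : max(top+1, 0)].
lemma take_drop_eq_slice (l : List String) (t : Int) :
    (l.take (t + 1).toNat).drop 1 = PySem.List.slice l (some 1) (some (max (t + 1) 0)) := by
  cases l with
  | nil => simp [PySem.List.slice, PySem.List.clampIdx]
  | cons x xs =>
    simp only [PySem.List.slice, PySem.List.clampIdx]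
    have h1 : ¬ ((1 : Int) < 0) := by omega
    have h2 : ¬ (max (t + 1) 0 < (0 : Int)) := by omega
    have h3 : min (1 : Int).toNat (x :: xs).length = 1 := by simp
    simp only [if_neg h1, if_neg h2, h3, List.drop_take, List.take_eq_take_iff,
      List.length_drop]
    omega

-- range(M, 0, -1) is the descending list M, M-1, …, 1.
lemma pyRange_down_one (M : Int) :
    PySem.List.pyRange M 0 (-1) = (List.range M.toNat).map (fun k : Nat => M - (k : Int)) := by
  by_cases h : (0:Int) < M
  · have h0 : (M - 0 + -(-1) - 1) / -(-1) = M := by norm_num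
    have h1 : ((M - 0 + -(-1) - 1) / -(-1)).toNat = M.toNat := by rw [h0]
    simp only [PySem.List.pyRange, if_neg (by norm_num : ¬ (-1:Int) = 0),
      if_neg (by norm_num : ¬ (0:Int) < -1), if_pos h, h1]
    refine List.map_congr_left fun k _ => ?_
    ring
  · have h0 : M.toNat = 0 := by omega
    simp [PySem.List.pyRange, h, h0]

-- maxD with the identity key and default 0 bounds every member of the list.
lemma le_maxD (l : List Int) (v : Int) (hv : v ∈ l) : v ≤ PySem.List.maxD l (fun x => x) 0 := by
  cases hm : PySem.List.max? l (fun x => x) with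
  | none =>
    rw [PySem.List.max?_eq_none_iff] at hm
    simp [hm] at hv
  | some m =>
    have := PySem.List.max?_isMax hm v hv
    simpa [PySem.List.maxD, hm] using this

-- The bucket dict's entry at c collects, in order, the first components of the pairs of value c.
lemma getD_buckets (l : List (String × Int)) (b : PySem.Dict Int (List String)) (c : Int) :
    (l.foldl (fun (b : PySem.Dict Int (List String)) kv =>
        b.insert kv.2 (b.getD kv.2 [] ++ [kv.1])) b).getD c []
      = b.getD c [] ++ (l.filter (fun kv => kv.2 == c)).map (·.1) := by
  induction l generalizing b with
  | nil => simp
  | cons kv t ih =>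
    simp only [List.foldl_cons, ih, List.filter_cons]
    by_cases hc : kv.2 = c
    · subst hc
      simp [PySem.Dict.getD_insert_self]
    · rw [PySem.Dict.getD_insert_of_ne _ _ _ (Ne.symm hc)]
      simp [hc]

-- Splitting the descending range M, …, 1 at a value c inside it.
lemma range_map_split (M c : Int) (h1 : 1 ≤ c) (h2 : c ≤ M) :
    (List.range M.toNat).map (fun k : Nat => M - (k : Int))
      = ((List.range (M - c).toNat).map (fun k : Nat => M - (k : Int)))
        ++ c :: ((List.range (c - 1).toNat).map (fun k : Nat => c - 1 - (k : Int))) := by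
  have hM : M.toNat = (M - c).toNat + ((c - 1).toNat + 1) := by omega
  rw [hM, List.range_add, List.map_append, List.range_succ_eq_map]
  simp only [List.map_cons, List.map_map]
  refine congrArg _ ?_
  refine congrArg₂ _ ?_ ?_
  · push_cast; omega
  · refine List.map_congr_left fun k hk => ?_
    simp only [Function.comp]
    push_cast [Nat.succ_eq_add_one]; omega

-- insertBy passes over a prefix none of whose elements x goes before.
lemma insertBy_append_not_before (before : (String × Int) → (String × Int) → Bool)
    (x : String × Int) (P C : List (String × Int)) (h : ∀ p ∈ P, before x p = false) :
    PySem.List.insertBy before x (P ++ C) = P ++ PySem.List.insertBy before x C := by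
  induction P with
  | nil => simp
  | cons p t ih =>
    have hp : before x p = false := h p (by simp)
    simp only [List.cons_append, PySem.List.insertBy, hp]
    simp only [Bool.false_eq_true, if_false]
    rw [ih (fun q hq => h q (by simp [hq]))]

-- Members of a bucket have the bucket's key value.
lemma key_of_mem_filter (key : (String × Int) → Int) (l : List (String × Int)) (c : Int)
    (p : String × Int) (hp : p ∈ l.filter (fun y => key y == c)) : key p = c := by
  have := (List.mem_filter.mp hp).2
  simpa using this

-- Stable descending sort by an Int key with values in [1, M] is the concatenation of the
-- per-value buckets taken from M down to 1 (counting sort is the stable descending sort).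
lemma sorted_rev_eq_flatMap_buckets (key : (String × Int) → Int) (l : List (String × Int))
    (M : Int) (h : ∀ x ∈ l, 1 ≤ key x ∧ key x ≤ M) :
    PySem.List.sorted l key true
      = ((List.range M.toNat).map (fun k : Nat => M - (k : Int))).flatMap
          (fun c => l.filter (fun x => key x == c)) := by
  induction l using List.reverseRecOn with
  | nil => simp [PySem.List.sorted]
  | append_singleton t x ih =>
    have hx := h x (by simp)
    have ht : ∀ y ∈ t, 1 ≤ key y ∧ key y ≤ M := fun y hy => h y (by simp [hy])
    rw [PySem.List.sorted_rev_eq_foldl_insertBy, List.foldl_append, List.foldl_cons,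
      List.foldl_nil, ← PySem.List.sorted_rev_eq_foldl_insertBy, ih ht]
    rw [range_map_split M (key x) hx.1 hx.2]
    simp only [List.flatMap_append, List.flatMap_cons]
    have hfilter : ∀ c : Int, (t ++ [x]).filter (fun y => key y == c)
        = t.filter (fun y => key y == c) ++ if key x == c then [x] else [] := by
      intro c; rw [List.filter_append]; congr 1
      by_cases hkc : key x = c
      · have hb : (key x == c) = true := by simpa using hkc
        simp [List.filter, hb]
      · have hb : (key x == c) = false := by simpa using hkc
        simp [List.filter, hb]
    have hP1 : ∀ c ∈ (List.range (M - key x).toNat).map (fun k : Nat => M - (k : Int)),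
        key x < c := by
      intro c hc
      obtain ⟨k, hk, rfl⟩ := List.mem_map.mp hc
      have := List.mem_range.mp hk
      omega
    have hP2 : ∀ c ∈ (List.range (key x - 1).toNat).map
        (fun k : Nat => key x - 1 - (k : Int)), c < key x := by
      intro c hc
      obtain ⟨k, hk, rfl⟩ := List.mem_map.mp hc
      omega
    have e1 : ((List.range (M - key x).toNat).map (fun k : Nat => M - (k : Int))).flatMap
          (fun c => (t ++ [x]).filter (fun y => key y == c))
        = ((List.range (M - key x).toNat).map (fun k : Nat => M - (k : Int))).flatMap
          (fun c => t.filter (fun y => key y == c)) := by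
      refine List.flatMap_congr fun c hc => ?_
      rw [hfilter c, if_neg (by simp; exact fun e => absurd e (by have := hP1 c hc; omega)),
        List.append_nil]
    have e2 : ((List.range (key x - 1).toNat).map (fun k : Nat => key x - 1 - (k : Int))).flatMap
          (fun c => (t ++ [x]).filter (fun y => key y == c))
        = ((List.range (key x - 1).toNat).map (fun k : Nat => key x - 1 - (k : Int))).flatMap
          (fun c => t.filter (fun y => key y == c)) := by
      refine List.flatMap_congr fun c hc => ?_
      rw [hfilter c, if_neg (by simp; exact fun e => absurd e (by have := hP2 c hc; omega)),
        List.append_nil]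
    rw [e1, e2, hfilter (key x), if_pos (by simp)]
    set A := ((List.range (M - key x).toNat).map (fun k : Nat => M - (k : Int))).flatMap
      (fun c => t.filter (fun y => key y == c)) with hA
    set B := t.filter (fun y => key y == key x) with hB
    set C := ((List.range (key x - 1).toNat).map (fun k : Nat => key x - 1 - (k : Int))).flatMap
      (fun c => t.filter (fun y => key y == c)) with hC
    show PySem.List.insertBy (fun a b => decide (key b < key a)) x (A ++ (B ++ C))
        = A ++ ((B ++ [x]) ++ C)
    have hnotA : ∀ p ∈ A ++ B, (fun a b => decide (key b < key a)) x p = false := by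
      intro p hp
      rcases List.mem_append.mp hp with hpA | hpB
      · obtain ⟨c, hc, hpf⟩ := List.mem_flatMap.mp hpA
        have := key_of_mem_filter key t c p hpf
        have := hP1 c hc
        simp; omega
      · have := key_of_mem_filter key t (key x) p hpB
        simp; omega
    have hsplit := insertBy_append_not_before (fun a b => decide (key b < key a)) x (A ++ B) C
      hnotA
    rw [← List.append_assoc, hsplit]
    have hCins : PySem.List.insertBy (fun a b => decide (key b < key a)) x C = x :: C := by
      cases hCc : C with
      | nil => simp [PySem.List.insertBy]
      | cons c0 cs =>
        have hc0 : key c0 < key x := by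
          have hm : c0 ∈ C := by rw [hCc]; simp
          obtain ⟨c, hc, hpf⟩ := List.mem_flatMap.mp hm
          have := key_of_mem_filter key t c c0 hpf
          have := hP2 c hc
          omega
        simp [PySem.List.insertBy, hc0]
    rw [hCins]
    simp

theorem get_outgoing_eq (paper_id : String) (citations_out_dict : List (String × List String)) (citations_in_dict : List (String × List String)) (top : Int) :
    get_outgoing paper_id citations_out_dict citations_in_dict top
      = get_outgoing_alt paper_id citations_out_dict citations_in_dict top := by
  simp only [get_outgoing, get_outgoing_alt, counts_eq_counter]
  set xs := ((PySem.Dict.ofList citations_out_dict).getD paper_id []).foldl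
      (fun acc paper => acc ++ (PySem.Dict.ofList citations_in_dict).getD paper []) [] with hxs
  set cnt := PySem.Dict.counter xs with hcnt
  set maxc := PySem.List.maxD cnt.values (fun v => v) 0 with hmaxc
  have hbounds : ∀ p ∈ cnt.items, 1 ≤ p.2 ∧ p.2 ≤ maxc := by
    intro p hp
    refine ⟨?_, ?_⟩
    · rw [hcnt, PySem.Dict.items_counter] at hp
      obtain ⟨k, hk, rfl⟩ := List.mem_map.mp hp
      have hkxs : k ∈ xs := (PySem.Set.mem_ofList xs k).mp hk
      have hpos : 0 < xs.count k := List.count_pos_iff.mpr hkxs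
      show (1:Int) ≤ ((xs.count k : Nat) : Int)
      exact_mod_cast hpos
    · exact le_maxD _ _ (by simp only [PySem.Dict.values]; exact List.mem_map.mpr ⟨p, hp, rfl⟩)
  have hb : ∀ c : Int,
      (cnt.items.foldl (fun (b : PySem.Dict Int (List String)) kv =>
          b.insert kv.2 (b.getD kv.2 [] ++ [kv.1])) PySem.Dict.empty).getD c []
        = (cnt.items.filter (fun kv => kv.2 == c)).map (·.1) := by
    intro c
    rw [getD_buckets]
    simp [PySem.Dict.getD, PySem.Dict.get?, PySem.Dict.empty]
  rw [pyRange_down_one maxc, PySem.List.foldl_append_eq_flatMap, List.nil_append,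
    List.flatMap_congr (fun c _ => hb c),
    sorted_rev_eq_flatMap_buckets (fun p => p.2) cnt.items maxc hbounds,
    take_drop_eq_slice, List.map_flatMap]

-- ===== VERDICT (by name: the statement is the Claim_ definition above) =====
theorem get_outgoing_spec : Claim_equal_get_outgoing := by
  intro paper_id out_d in_d top _ _
  exact get_outgoing_eq paper_id out_d in_d top
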